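-- pv_equiv track=rewrite | github.com/PointlessAIM/logic-training | misiontic/cartas.py | juego
-- ===== SOURCE A (Python) =====
-- def tiene_cartas_altas(cartas_siguientes):
--
--     cartas_altas = False
--
--     if "A" in cartas_siguientes:
--         cartas_altas = True
--     if "J" in cartas_siguientes:
--         cartas_altas = True
--     if "Q" in cartas_siguientes:
--         cartas_altas = True
--     if "K" in cartas_siguientes:
--         cartas_altas = True
--
--     return cartas_altas
--
-- def juego(baraja):
--
--     jugador_uno = 0
--     jugador_dos = 0
--     temp = 0
--     count = 0
--
--     for i in baraja:
--
--         barajas_restantes = len (baraja) - (count + 1)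
--
--         if i == "A":
--             if tiene_cartas_altas(baraja[count+1:count+2]) == False:
--                 if barajas_restantes >=1:
--                     temp +=1
--         if i == "J":
--             if tiene_cartas_altas(baraja[count+1:count+3]) == False:
--                 if barajas_restantes >=2:
--                     temp +=2
--         if i == "Q":
--             if tiene_cartas_altas(baraja[count+1:count+4]) == False:
--                 if barajas_restantes >=3:
--                     temp +=3
--         if i == "K":
--             if tiene_cartas_altas(baraja[count+1:count+5]) == False:
--                 if barajas_restantes >=4:
--                     temp +=4
--         if count % 2 == 0:
--             jugador_uno += temp
--         else:
--             jugador_dos += temp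
--         count += 1
--         temp = 0
--
--     return jugador_uno, jugador_dos
-- ===== SOURCE B (Python) =====
-- def juego(baraja):
--     vals = {"A": 1, "J": 2, "Q": 3, "K": 4}
--     n = len(baraja)
--     next_high = [0] * n
--     nxt = n + 4  # stands in for "no high card follows"
--     for i in range(n - 1, -1, -1):
--         next_high[i] = nxt
--         if baraja[i] in vals:
--             nxt = i
--     p = [0, 0]
--     for i, c in enumerate(baraja):
--         v = vals.get(c)
--         if v is not None and next_high[i] > i + v and n - i - 1 >= v:
--             p[i % 2] += v
--     return p[0], p[1]
-- ===== Notes on version B (the rewrite author's own statement) =====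
-- stated objective: alternative
-- what changed: B precomputes in one backward pass the index of the nearest following high card (next_high table) and then scores in a single forward scan, instead of A's re-slicing the deck and re-scanning the slice for every card.
import Mathlib
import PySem

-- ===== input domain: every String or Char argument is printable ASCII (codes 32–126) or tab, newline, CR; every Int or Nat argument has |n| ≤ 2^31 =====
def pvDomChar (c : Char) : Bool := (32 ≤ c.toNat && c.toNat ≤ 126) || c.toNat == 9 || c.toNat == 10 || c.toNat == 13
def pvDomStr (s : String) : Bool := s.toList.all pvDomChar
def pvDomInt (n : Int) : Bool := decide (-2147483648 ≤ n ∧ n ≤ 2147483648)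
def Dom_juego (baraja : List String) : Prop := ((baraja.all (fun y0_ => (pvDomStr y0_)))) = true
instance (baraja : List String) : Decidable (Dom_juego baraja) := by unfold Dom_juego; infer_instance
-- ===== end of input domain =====

-- B replaces A's per-card re-slicing with a backward pass precomputing the index of the
-- nearest following high card, then a single forward scoring scan (alternative decomposition).

-- ===== PORT A =====
def tiene_cartas_altas (cartas_siguientes : List String) : Bool :=
  let cartas_altas := false
  let cartas_altas := if "A" ∈ cartas_siguientes then true else cartas_altas
  let cartas_altas := if "J" ∈ cartas_siguientes then true else cartas_altas
  let cartas_altas := if "Q" ∈ cartas_siguientes then true else cartas_altas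
  let cartas_altas := if "K" ∈ cartas_siguientes then true else cartas_altas
  cartas_altas

def juegoStep (baraja : List String) (st : Int × Int × Int × Int) (i : String) :
    Int × Int × Int × Int :=
  let jugador_uno := st.1
  let jugador_dos := st.2.1
  let temp := st.2.2.1
  let count := st.2.2.2
  let barajas_restantes : Int := (baraja.length : Int) - (count + 1)
  let temp := if i = "A" then
      (if tiene_cartas_altas (PySem.List.slice baraja (some (count+1)) (some (count+2))) = false then
        (if barajas_restantes ≥ 1 then temp + 1 else temp) else temp) else temp
  let temp := if i = "J" then
      (if tiene_cartas_altas (PySem.List.slice baraja (some (count+1)) (some (count+3))) = false then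
        (if barajas_restantes ≥ 2 then temp + 2 else temp) else temp) else temp
  let temp := if i = "Q" then
      (if tiene_cartas_altas (PySem.List.slice baraja (some (count+1)) (some (count+4))) = false then
        (if barajas_restantes ≥ 3 then temp + 3 else temp) else temp) else temp
  let temp := if i = "K" then
      (if tiene_cartas_altas (PySem.List.slice baraja (some (count+1)) (some (count+5))) = false then
        (if barajas_restantes ≥ 4 then temp + 4 else temp) else temp) else temp
  let jj : Int × Int := if PySem.Int.mod count 2 = 0
    then (jugador_uno + temp, jugador_dos) else (jugador_uno, jugador_dos + temp)
  (jj.1, jj.2, 0, count + 1)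

def juego (baraja : List String) : Int × Int :=
  let r := baraja.foldl (juegoStep baraja) (0, 0, 0, 0)
  (r.1, r.2.1)

-- ===== PORT B =====
def juegoVals : PySem.Dict String Int :=
  PySem.Dict.ofList [("A", 1), ("J", 2), ("Q", 3), ("K", 4)]

-- backward pass: builds next_high (front of the list = lower indices) right to left
def bStepBack (p : Int × String) (st : Int × List Int) : Int × List Int :=
  let next_high := st.1 :: st.2
  let nxt := if (PySem.Dict.get? juegoVals p.2).isSome then p.1 else st.1
  (nxt, next_high)

-- forward pass: score card at index x.1.1 when the next high card x.2 is far enough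
def bStepFwd (n : Int) (st : Int × Int) (x : (Int × String) × Int) : Int × Int :=
  match PySem.Dict.get? juegoVals x.1.2 with
  | none => st
  | some v =>
    if x.2 > x.1.1 + v ∧ n - x.1.1 - 1 ≥ v then
      (if PySem.Int.mod x.1.1 2 = 0 then (st.1 + v, st.2) else (st.1, st.2 + v))
    else st

def juego_alt (baraja : List String) : Int × Int :=
  let n : Int := (baraja.length : Int)
  let next_high := ((PySem.List.enumerate baraja).foldr bStepBack (n + 4, [])).2
  let r := (List.zip (PySem.List.enumerate baraja) next_high).foldl (bStepFwd n) (0, 0)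
  (r.1, r.2)

-- ===== PRECONDITION & SPEC =====
def Spec_juego (baraja : List String) (out : Int × Int) : Prop := out = juego_alt baraja
instance (baraja : List String) (out : Int × Int) : Decidable (Spec_juego baraja out) := by unfold Spec_juego; infer_instance

-- ===== CLAIM (what is proved, stated in full; the proofs are below) =====
def Claim_equal_juego : Prop := ∀ (baraja : List String), Dom_juego baraja → Spec_juego baraja (juego baraja)

-- ===== LEMMAS AND PROOFS =====

def isHigh (c : String) : Bool := c = "A" || c = "J" || c = "Q" || c = "K"

def hval (c : String) : Int :=
  if c = "A" then 1 else if c = "J" then 2 else if c = "Q" then 3 else if c = "K" then 4 else 0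

-- per-card contribution as a function of the card and the remaining deck
def contrib (c : String) (rest : List String) : Int :=
  let v := hval c
  if v ≠ 0 ∧ (rest.take v.toNat).all (fun x => !isHigh x) = true ∧ (rest.length : Int) ≥ v
  then v else 0

-- common reference semantics: score of the remaining deck, flag = current index even
def specGo : List String → Bool → Int × Int
  | [], _ => (0, 0)
  | c :: rest, ev =>
    let t := contrib c rest
    let p := specGo rest (!ev)
    if ev then (p.1 + t, p.2) else (p.1, p.2 + t)

-- first-following-high-card position, as maintained by B's backward pass
def nxtOf (n : Int) : List String → Int → Int
  | [], _ => n + 4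
  | c :: rest, t => if isHigh c then t else nxtOf n rest (t + 1)

def tblOf (n : Int) : List String → Int → List Int
  | [], _ => []
  | _ :: rest, t => nxtOf n rest (t + 1) :: tblOf n rest (t + 1)

lemma tiene_eq (l : List String) : tiene_cartas_altas l = l.any isHigh := by
  induction l with
  | nil => decide
  | cons x xs ih =>
    simp only [tiene_cartas_altas, List.mem_cons, List.any_cons, isHigh] at *
    by_cases h1 : x = "A" <;> by_cases h2 : x = "J" <;> by_cases h3 : x = "Q" <;> by_cases h4 : x = "K" <;>
      simp_all [eq_comm]

lemma juegoVals_mk : juegoVals = PySem.Dict.mk [("A",1),("J",2),("Q",3),("K",4)] := by decide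

lemma getVals (c : String) :
    PySem.Dict.get? juegoVals c = if isHigh c then some (hval c) else none := by
  rw [juegoVals_mk]
  by_cases h1 : c = "A"
  · subst h1; decide
  by_cases h2 : c = "J"
  · subst h2; decide
  by_cases h3 : c = "Q"
  · subst h3; decide
  by_cases h4 : c = "K"
  · subst h4; decide
  simp [PySem.Dict.get?, beq_iff_eq, isHigh,
    Ne.symm h1, Ne.symm h2, Ne.symm h3, Ne.symm h4, h1, h2, h3, h4]

lemma nxtOf_lb (n : Int) : ∀ (xs : List String) (t : Int),
    t ≤ nxtOf n xs t ∨ nxtOf n xs t = n + 4 := by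
  intro xs
  induction xs with
  | nil => intro t; right; rfl
  | cons c r ih =>
    intro t
    simp only [nxtOf]
    split
    · left; omega
    · rcases ih (t + 1) with h | h
      · left; omega
      · right; exact h

lemma nxt_gt_iff (n : Int) : ∀ (xs : List String) (s v : Int), 0 ≤ v → s + v ≤ n + 3 →
    (s + v < nxtOf n xs (s + 1) ↔ (xs.take v.toNat).all (fun x => !isHigh x) = true) := by
  intro xs
  induction xs with
  | nil =>
    intro s v hv hb
    simp only [nxtOf, List.take_nil, List.all_nil]
    constructor <;> intro _
    · trivial
    · omega
  | cons c r ih =>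
    intro s v hv hb
    by_cases hv0 : v = 0
    · subst hv0
      simp only [Int.toNat_zero, List.take_zero, List.all_nil]
      constructor <;> intro _
      · trivial
      · rcases nxtOf_lb n (c :: r) (s + 1) with h | h <;> omega
    · have hv1 : 1 ≤ v := by omega
      have htn : v.toNat = (v - 1).toNat + 1 := by omega
      rw [htn]
      simp only [nxtOf, List.take_succ_cons, List.all_cons, Bool.and_eq_true, Bool.not_eq_true']
      by_cases hc : isHigh c
      · rw [if_pos hc]
        simp [hc]; omega
      · rw [if_neg hc]
        have := ih (s + 1) (v - 1) (by omega) (by omega)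
        rw [show s + 1 + (v - 1) = s + v by ring] at this
        rw [show (s + 1) + 1 = s + 1 + 1 by ring] at this
        simp [hc, this]

lemma isHigh_iff_hval (c : String) : isHigh c = true ↔ hval c ≠ 0 := by
  by_cases h1 : c = "A" <;> by_cases h2 : c = "J" <;> by_cases h3 : c = "Q" <;> by_cases h4 : c = "K" <;>
    simp_all [isHigh, hval]

lemma bp_spec (n : Int) : ∀ (xs : List String) (t : Int),
    (PySem.List.enumerate xs t).foldr bStepBack (n + 4, []) = (nxtOf n xs t, tblOf n xs t) := by
  intro xs
  induction xs with
  | nil => intro t; rfl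
  | cons c r ih =>
    intro t
    rw [PySem.List.enumerate_cons, List.foldr_cons, ih (t + 1)]
    simp only [bStepBack, nxtOf, tblOf, getVals]
    by_cases hc : isHigh c <;> simp [hc]

lemma mod_two_nat (s : Nat) : PySem.Int.mod (s : Int) 2 = ((s % 2 : Nat) : Int) := by
  exact_mod_cast PySem.Int.mod_natCast s 2

lemma fwd_spec (n : Int) : ∀ (xs : List String) (s : Nat) (j1 j2 : Int),
    n = (s : Int) + xs.length →
    (List.zip (PySem.List.enumerate xs (s : Int)) (tblOf n xs (s : Int))).foldl (bStepFwd n) (j1, j2)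
      = (j1 + (specGo xs (s % 2 == 0)).1, j2 + (specGo xs (s % 2 == 0)).2) := by
  intro xs
  induction xs with
  | nil => intro s j1 j2 hn; simp [specGo]
  | cons c r ih =>
    intro s j1 j2 hn
    rw [PySem.List.enumerate_cons]
    simp only [tblOf, List.zip_cons_cons, List.foldl_cons]
    have hlen : n = ((s : Int) + 1) + r.length := by
      simp [List.length_cons] at hn; omega
    have hstep : bStepFwd n (j1, j2) (((s : Int), c), nxtOf n r ((s : Int) + 1)) =
        (if s % 2 = 0 then (j1 + contrib c r, j2) else (j1, j2 + contrib c r)) := by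
      simp only [bStepFwd, getVals]
      by_cases hc : isHigh c
      · rw [if_pos hc]
        have hv1 : 1 ≤ hval c ∧ hval c ≤ 4 := by
          by_cases h1 : c = "A" <;> by_cases h2 : c = "J" <;> by_cases h3 : c = "Q" <;>
            by_cases h4 : c = "K" <;> simp_all [isHigh, hval]
        have hgt := nxt_gt_iff n r (s : Int) (hval c) (by omega) (by omega)
        have hrl : n - (s : Int) - 1 = (r.length : Int) := by omega
        have hne : hval c ≠ 0 := by omega
        have hcon : contrib c r =
            if ((r.take (hval c).toNat).all (fun x => !isHigh x) = true ∧ (r.length : Int) ≥ hval c)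
            then hval c else 0 := by
          simp [contrib, hne]
        have hiff : ((s : Int) + hval c < nxtOf n r ((s : Int) + 1) ∧ n - (s : Int) - 1 ≥ hval c)
            ↔ (((r.take (hval c).toNat).all (fun x => !isHigh x) = true) ∧ (r.length : Int) ≥ hval c) := by
          rw [hrl]; exact and_congr_left (fun _ => hgt)
        rw [hcon]
        simp only [gt_iff_lt]
        rw [if_congr hiff rfl rfl]
        by_cases hg : (((r.take (hval c).toNat).all (fun x => !isHigh x) = true) ∧ (r.length : Int) ≥ hval c)
        · rw [if_pos hg, if_pos hg]
          by_cases hp : s % 2 = 0 <;> simp [hp] <;> omega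
        · rw [if_neg hg, if_neg hg]
          by_cases hp : s % 2 = 0 <;> simp [hp]
      · rw [if_neg hc]
        have h0 : hval c = 0 := by
          by_contra h; exact hc ((isHigh_iff_hval c).mpr h)
        simp [contrib, h0]
    rw [hstep]
    have hcast : ((s : Int) + 1) = (((s + 1 : Nat)) : Int) := by push_cast; ring
    have hflip : ((s + 1) % 2 == 0) = !(s % 2 == 0) := by
      by_cases hp : s % 2 = 0
      · have : (s + 1) % 2 = 1 := by omega
        simp [hp, this]
      · have h1 : s % 2 = 1 := by omega
        have : (s + 1) % 2 = 0 := by omega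
        simp [h1, this]
    by_cases hp : s % 2 = 0
    · rw [if_pos hp, hcast, ih (s + 1) _ _ (by push_cast; omega)]
      have hb : (s % 2 == 0) = true := by simp [hp]
      simp [specGo, hflip, hb, Prod.ext_iff]
      ring
    · rw [if_neg hp, hcast, ih (s + 1) _ _ (by push_cast; omega)]
      have hb : (s % 2 == 0) = false := by simp [hp]
      simp [specGo, hflip, hb, Prod.ext_iff]
      ring

set_option maxHeartbeats 1000000 in
lemma stepA_eq (baraja : List String) (c : String) (rest : List String) (cnt : Nat)
    (j1 j2 : Int) (h : baraja.drop cnt = c :: rest) :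
    juegoStep baraja (j1, j2, 0, (cnt : Int)) c =
      ((if cnt % 2 = 0 then j1 + contrib c rest else j1),
       (if cnt % 2 = 0 then j2 else j2 + contrib c rest), 0, (cnt : Int) + 1) := by
  have hlt : cnt < baraja.length := by
    by_contra hh
    rw [List.drop_eq_nil_of_le (by omega)] at h
    simp at h
  have h' : baraja.drop (cnt + 1) = rest := by
    have : baraja.drop (cnt + 1) = (baraja.drop cnt).drop 1 := by
      rw [List.drop_drop]
    rw [this, h, List.drop_one, List.tail_cons]
  have hlen : baraja.length = cnt + 1 + rest.length := by
    have := congrArg List.length h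
    rw [List.length_drop] at this
    simp at this
    omega
  have e1 : PySem.List.slice baraja (some ((cnt : Int) + 1)) (some ((cnt : Int) + 2)) = rest.take 1 := by
    rw [show ((cnt : Int) + 1) = (((cnt + 1 : Nat)) : Int) by push_cast; ring,
        show ((cnt : Int) + 2) = (((cnt + 2 : Nat)) : Int) by push_cast; ring,
        PySem.List.slice_natCast, h']
    congr 1
    omega
  have e2 : PySem.List.slice baraja (some ((cnt : Int) + 1)) (some ((cnt : Int) + 3)) = rest.take 2 := by
    rw [show ((cnt : Int) + 1) = (((cnt + 1 : Nat)) : Int) by push_cast; ring,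
        show ((cnt : Int) + 3) = (((cnt + 3 : Nat)) : Int) by push_cast; ring,
        PySem.List.slice_natCast, h']
    congr 1
    omega
  have e3 : PySem.List.slice baraja (some ((cnt : Int) + 1)) (some ((cnt : Int) + 4)) = rest.take 3 := by
    rw [show ((cnt : Int) + 1) = (((cnt + 1 : Nat)) : Int) by push_cast; ring,
        show ((cnt : Int) + 4) = (((cnt + 4 : Nat)) : Int) by push_cast; ring,
        PySem.List.slice_natCast, h']
    congr 1
    omega
  have e4 : PySem.List.slice baraja (some ((cnt : Int) + 1)) (some ((cnt : Int) + 5)) = rest.take 4 := by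
    rw [show ((cnt : Int) + 1) = (((cnt + 1 : Nat)) : Int) by push_cast; ring,
        show ((cnt : Int) + 5) = (((cnt + 5 : Nat)) : Int) by push_cast; ring,
        PySem.List.slice_natCast, h']
    congr 1
    omega
  have hrest : (baraja.length : Int) - ((cnt : Int) + 1) = (rest.length : Int) := by
    push_cast [hlen]; ring
  have hmod : (PySem.Int.mod ((cnt : Int)) 2 = 0) ↔ (cnt % 2 = 0) := by
    rw [mod_two_nat]; exact_mod_cast Iff.rfl
  simp only [juegoStep, e1, e2, e3, e4, hrest, tiene_eq]
  by_cases h1 : c = "A" <;> by_cases h2 : c = "J" <;> by_cases h3 : c = "Q" <;> by_cases h4 : c = "K" <;>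
    simp_all [contrib, hval, isHigh, hmod, apply_ite] <;>
    (first | (split_ifs <;> simp_all <;> omega) | (intro hA hB hC; have := hA hB; omega))

lemma parity_flip (s : Nat) : ((s + 1) % 2 == 0) = !(s % 2 == 0) := by
  by_cases hp : s % 2 = 0
  · have : (s + 1) % 2 = 1 := by omega
    simp [hp, this]
  · have h1 : s % 2 = 1 := by omega
    have : (s + 1) % 2 = 0 := by omega
    simp [h1, this]

lemma drop_succ_of_drop_cons {baraja rest : List String} {c : String} {cnt : Nat}
    (h : baraja.drop cnt = c :: rest) : baraja.drop (cnt + 1) = rest := by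
  have : baraja.drop (cnt + 1) = (baraja.drop cnt).drop 1 := by rw [List.drop_drop]
  rw [this, h, List.drop_one, List.tail_cons]

lemma A_go (baraja : List String) : ∀ (suf : List String) (cnt : Nat) (j1 j2 : Int),
    baraja.drop cnt = suf →
    suf.foldl (juegoStep baraja) (j1, j2, 0, (cnt : Int)) =
      (j1 + (specGo suf (cnt % 2 == 0)).1, j2 + (specGo suf (cnt % 2 == 0)).2, 0,
        (cnt : Int) + suf.length) := by
  intro suf
  induction suf with
  | nil => intro cnt j1 j2 h; simp [specGo]
  | cons c rest ih =>
    intro cnt j1 j2 h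
    rw [List.foldl_cons, stepA_eq baraja c rest cnt j1 j2 h]
    have h' := drop_succ_of_drop_cons h
    by_cases hp : cnt % 2 = 0
    · rw [if_pos hp, if_pos hp,
        show ((cnt : Int) + 1) = (((cnt + 1 : Nat)) : Int) by push_cast; ring,
        ih (cnt + 1) _ _ h']
      have hb : (cnt % 2 == 0) = true := by simp [hp]
      simp [specGo, parity_flip, hb, Prod.ext_iff]
      exact ⟨by ring, by ring⟩
    · rw [if_neg hp, if_neg hp,
        show ((cnt : Int) + 1) = (((cnt + 1 : Nat)) : Int) by push_cast; ring,
        ih (cnt + 1) _ _ h']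
      have hb : (cnt % 2 == 0) = false := by simp [hp]
      simp [specGo, parity_flip, hb, Prod.ext_iff]
      exact ⟨by ring, by ring⟩

lemma a_eq_spec (baraja : List String) : juego baraja = specGo baraja true := by
  have hgo := A_go baraja baraja 0 0 0 (by simp)
  norm_num at hgo
  unfold juego
  rw [hgo]

lemma alt_eq_spec (baraja : List String) : juego_alt baraja = specGo baraja true := by
  have hf := fwd_spec ((baraja.length : Int)) baraja 0 0 0 (by push_cast; ring)
  norm_num at hf
  simp only [juego_alt]
  rw [bp_spec, hf]


-- ===== VERDICT (by name: the statement is the Claim_ definition above) =====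
theorem juego_spec : Claim_equal_juego := by
  intro baraja _
  unfold Spec_juego
  rw [a_eq_spec, alt_eq_spec]
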